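-- pv_equiv track=rewrite | github.com/ZiedKnani/ocr-identity | main_v2.py | _network_path_parts
-- ===== SOURCE A (Python) =====
-- from typing import List, Optional, Tuple, Union
--
-- def _is_unc_path(path_value: Optional[str]) -> bool:
--     if not path_value:
--         return False
--     return str(path_value).startswith("\\\\") or str(path_value).startswith("//")
--
-- def _network_path_parts(path_value: str) -> Optional[tuple]:
--     if not _is_unc_path(path_value):
--         return None
--     cleaned = path_value.replace("/", "\\").lstrip("\\")
--     parts = [p for p in cleaned.split("\\") if p]
--     if len(parts) < 2:
--         return None
--     return parts[0], parts[1]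
-- ===== SOURCE B (Python) =====
-- def _take_token(s, i):
--     # skip leading separators from position i, then collect the run of
--     # non-separator characters; return (token, index after the token)
--     n = len(s)
--     while i < n and s[i] in "\\/":
--         i += 1
--     j = i
--     while j < n and s[j] not in "\\/":
--         j += 1
--     return s[i:j], j
--
--
-- def _network_path_parts(path_value):
--     if not path_value or (path_value[:2] != "\\\\" and path_value[:2] != "//"):
--         return None
--     server, k = _take_token(path_value, 0)
--     share, _ = _take_token(path_value, k)
--     if not server or not share:
--         return None
--     return server, share
-- ===== Notes on version B (the rewrite author's own statement) =====
-- stated objective: alternative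
-- what changed: Replaces A's replace/lstrip/split/filter pipeline (which materializes the full list of path components) with a single index-based scan that extracts just the first two separator-delimited tokens and never builds intermediate strings or lists.
import Mathlib
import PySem

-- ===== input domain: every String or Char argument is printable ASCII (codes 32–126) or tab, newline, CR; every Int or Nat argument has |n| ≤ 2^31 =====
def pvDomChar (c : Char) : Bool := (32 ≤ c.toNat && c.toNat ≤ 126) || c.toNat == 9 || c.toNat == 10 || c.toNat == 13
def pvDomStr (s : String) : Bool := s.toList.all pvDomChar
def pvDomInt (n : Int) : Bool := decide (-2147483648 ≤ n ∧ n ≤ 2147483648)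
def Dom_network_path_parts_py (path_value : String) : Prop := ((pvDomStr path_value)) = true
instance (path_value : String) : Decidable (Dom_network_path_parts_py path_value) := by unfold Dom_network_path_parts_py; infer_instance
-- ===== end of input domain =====

-- B replaces A's replace/lstrip/split/filter pipeline with a single two-token scan over the raw string (alternative, same cost); return values proved equal.

-- ===== PORT A =====
def is_unc_path_py (path_value : String) : Bool :=
  if path_value = "" then false
  else PySem.Str.startswith path_value "\\\\" || PySem.Str.startswith path_value "//"

def network_path_parts_py (path_value : String) : Option (String × String) :=
  if is_unc_path_py path_value = false then none
  else
    -- lstrip("\\") ported by hand as dropWhile (· == '\\'): exact for a single-character strip set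
    let cleaned : List Char :=
      (PySem.Chars.replace path_value.toList ['/'] ['\\']).dropWhile (· == '\\')
    let parts := (PySem.Chars.splitOn cleaned ['\\']).filter (fun p => !p.isEmpty)
    if parts.length < 2 then none
    else some (String.ofList (parts.getD 0 []), String.ofList (parts.getD 1 []))

-- ===== PORT B =====
def pvSep (c : Char) : Bool := c == '\\' || c == '/'

-- port of _take_token: the two while-loops are dropWhile (skip separators) and takeWhile/dropWhile (collect the token)
def pvToken (s : List Char) : List Char × List Char :=
  let r := s.dropWhile pvSep
  (r.takeWhile (fun c => !pvSep c), r.dropWhile (fun c => !pvSep c))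

def network_path_parts_py_alt (path_value : String) : Option (String × String) :=
  match path_value.toList with
  | a :: b :: _ =>
    if (a == '\\' && b == '\\') || (a == '/' && b == '/') then
      let t1 := pvToken path_value.toList
      let t2 := pvToken t1.2
      if t1.1.isEmpty || t2.1.isEmpty then none
      else some (String.ofList t1.1, String.ofList t2.1)
    else none
  | _ => none

-- ===== PRECONDITION & SPEC =====
def Spec_network_path_parts_py (path_value : String) (out : Option (String × String)) : Prop := out = network_path_parts_py_alt path_value
instance (path_value : String) (out : Option (String × String)) : Decidable (Spec_network_path_parts_py path_value out) := by unfold Spec_network_path_parts_py; infer_instance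

-- ===== CLAIM (what is proved, stated in full; the proofs are below) =====
def Claim_equal_network_path_parts_py : Prop := ∀ (path_value : String), Dom_network_path_parts_py path_value → Spec_network_path_parts_py path_value (network_path_parts_py path_value)

-- ===== LEMMAS AND PROOFS =====

-- the single-character map performed by replace("/", "\\")
def pvRep (c : Char) : Char := if c = '/' then '\\' else c

-- clean recursive model of str.split with a single-character separator
def pvSplitOne (c : Char) : List Char → List (List Char)
  | [] => [[]]
  | a :: s => if a = c then [] :: pvSplitOne c s else (pvSplitOne c s).modifyHead (a :: ·)

-- the token decomposition both pipelines compute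
def pvFields (s : List Char) : List (List Char) :=
  match s with
  | [] => []
  | a :: t =>
    if pvSep a then pvFields t
    else (a :: t.takeWhile (fun c => !pvSep c)) :: pvFields (t.dropWhile (fun c => !pvSep c))
termination_by s.length
decreasing_by
  · simp
  · simpa using Nat.lt_succ_of_le (List.length_dropWhile_le _ _)

theorem pvSplitOne_ne_nil (c : Char) (l : List Char) : pvSplitOne c l ≠ [] := by
  induction l with
  | nil => simp [pvSplitOne]
  | cons a t ih =>
    simp only [pvSplitOne]
    split
    · simp
    · rcases h : pvSplitOne c t with _ | ⟨x, xs⟩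
      · exact absurd h ih
      · simp [h]

theorem pvRep_beq (x : Char) : (pvRep x == '\\') = pvSep x := by
  by_cases h1 : x = '/'
  · subst h1; decide
  · by_cases h2 : x = '\\'
    · subst h2; decide
    · have e1 : (x == '/') = false := beq_eq_false_iff_ne.mpr h1
      have e2 : (x == '\\') = false := beq_eq_false_iff_ne.mpr h2
      simp [pvRep, pvSep, h1, e1, e2]

theorem pvRep_bne (x : Char) : (pvRep x != '\\') = !pvSep x := by
  rw [bne, pvRep_beq]

theorem pvRep_id_of_not_sep (x : Char) (h : pvSep x = false) : pvRep x = x := by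
  simp [pvSep] at h
  simp [pvRep, h.2]

theorem splitOn_go_eq (c : Char) (l : List Char) : ∀ (fuel : Nat) (cur : List Char) (acc : List (List Char)), l.length ≤ fuel →
    PySem.Chars.splitOn.go [c] fuel l cur acc =
      acc.reverse ++ (pvSplitOne c l).modifyHead (cur.reverse ++ ·) := by
  induction l with
  | nil =>
    intro fuel cur acc _
    cases fuel <;> simp [PySem.Chars.splitOn.go, pvSplitOne]
  | cons a t ih =>
    intro fuel cur acc h
    cases fuel with
    | zero => simp at h
    | succ f =>
      have hf : t.length ≤ f := by simpa using h
      by_cases hac : a = c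
      · subst hac
        have hpre : [a].isPrefixOf (a :: t) = true := by simp [List.isPrefixOf]
        simp only [PySem.Chars.splitOn.go, hpre, if_true, List.drop_succ_cons]
        have hdrop1 : List.drop [a].length (a :: t) = t := by simp
        rw [hdrop1, ih f [] (cur.reverse :: acc) hf]
        rcases hs : pvSplitOne a t with _ | ⟨x, xs⟩
        · exact absurd hs (pvSplitOne_ne_nil a t)
        · simp [pvSplitOne, hs]
      · have hpre : [c].isPrefixOf (a :: t) = false := by
          simp [List.isPrefixOf]
          intro hh; exact hac hh.symm
        simp only [PySem.Chars.splitOn.go, hpre, Bool.false_eq_true, if_false]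
        rw [ih f (a :: cur) acc hf]
        rcases hs : pvSplitOne c t with _ | ⟨x, xs⟩
        · exact absurd hs (pvSplitOne_ne_nil c t)
        · simp [pvSplitOne, hac, hs]

theorem splitOn_eq (c : Char) (l : List Char) :
    PySem.Chars.splitOn l [c] = pvSplitOne c l := by
  unfold PySem.Chars.splitOn
  rw [splitOn_go_eq c l (l.length + 1) [] [] (Nat.le_succ _)]
  rcases hs : pvSplitOne c l with _ | ⟨x, xs⟩
  · exact absurd hs (pvSplitOne_ne_nil c l)
  · simp

theorem replace_go_eq (l : List Char) : ∀ (fuel : Nat) (acc : List Char), l.length ≤ fuel →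
    PySem.Chars.replace.go ['/'] ['\\'] fuel l acc = acc.reverse ++ l.map pvRep := by
  induction l with
  | nil =>
    intro fuel acc _
    cases fuel <;> simp [PySem.Chars.replace.go]
  | cons a t ih =>
    intro fuel acc h
    cases fuel with
    | zero => simp at h
    | succ f =>
      have hf : t.length ≤ f := by simpa using h
      by_cases ha : a = '/'
      · subst ha
        have hpre : ['/'].isPrefixOf ('/' :: t) = true := by simp [List.isPrefixOf]
        simp only [PySem.Chars.replace.go, hpre, if_true, List.drop_succ_cons]
        have hdrop1 : List.drop ['/'].length ('/' :: t) = t := by simp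
        rw [hdrop1, ih f _ hf]
        simp [pvRep]
      · have hpre : ['/'].isPrefixOf (a :: t) = false := by
          simp [List.isPrefixOf]
          intro hh; exact ha hh.symm
        simp only [PySem.Chars.replace.go, hpre, Bool.false_eq_true, if_false]
        rw [ih f _ hf]
        simp [pvRep, ha]

theorem replace_eq (l : List Char) :
    PySem.Chars.replace l ['/'] ['\\'] = l.map pvRep := by
  unfold PySem.Chars.replace
  simp only [List.isEmpty_cons, Bool.false_eq_true, if_false]
  simpa using replace_go_eq l l.length [] (le_refl _)

theorem pvSplitOne_span (c : Char) (l : List Char) :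
    pvSplitOne c l =
      (match l.dropWhile (fun x => x != c) with
        | [] => [l.takeWhile (fun x => x != c)]
        | _ :: r => l.takeWhile (fun x => x != c) :: pvSplitOne c r) := by
  induction l with
  | nil => simp [pvSplitOne]
  | cons a t ih =>
    by_cases hac : a = c
    · subst hac
      simp [pvSplitOne, List.dropWhile_cons, List.takeWhile_cons]
    · have hne : (a != c) = true := by simp [hac]
      simp only [pvSplitOne, hac, if_false, List.dropWhile_cons, List.takeWhile_cons, hne,
        if_true, ih]
      rcases hd : t.dropWhile (fun x => x != c) with _ | ⟨b, r⟩ <;> simp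

theorem filter_splitOne : ∀ (l : List Char),
    (pvSplitOne '\\' (l.map pvRep)).filter (fun p => !p.isEmpty) = pvFields l
  | [] => by simp [pvSplitOne, pvFields]
  | a :: t => by
    by_cases hs : pvSep a = true
    · have hfa : pvRep a = '\\' := by
        have := pvRep_beq a
        rw [hs] at this
        simpa using this
      have h1 : pvSplitOne '\\' (List.map pvRep (a :: t)) = [] :: pvSplitOne '\\' (List.map pvRep t) := by
        simp [pvSplitOne, hfa]
      rw [h1, List.filter_cons]
      simp only [List.isEmpty_nil, Bool.not_true, Bool.false_eq_true, if_false]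
      rw [filter_splitOne t]
      conv_rhs => rw [pvFields]
      simp [hs]
    · have hs' : pvSep a = false := by simpa using hs
      have hfa : pvRep a = a := pvRep_id_of_not_sep a hs'
      have hfun : ((fun y : Char => y != '\\') ∘ pvRep) = (fun y : Char => !pvSep y) :=
        funext pvRep_bne
      have hdw : (a :: t).dropWhile (fun x => !pvSep x) = t.dropWhile (fun x => !pvSep x) := by
        simp [hs']
      have htw : (a :: t).takeWhile (fun x => !pvSep x) = a :: t.takeWhile (fun x => !pvSep x) := by
        simp [hs']
      have hdrop : List.dropWhile (fun x => x != '\\') (List.map pvRep (a :: t))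
          = List.map pvRep (t.dropWhile (fun x => !pvSep x)) := by
        rw [List.dropWhile_map, hfun, hdw]
      have hid : List.map pvRep (t.takeWhile (fun x => !pvSep x))
          = List.map id (t.takeWhile (fun x => !pvSep x)) :=
        List.map_congr_left (fun x hx =>
          pvRep_id_of_not_sep x (by simpa using List.mem_takeWhile_imp hx))
      have htake : List.takeWhile (fun x => x != '\\') (List.map pvRep (a :: t))
          = a :: t.takeWhile (fun x => !pvSep x) := by
        rw [List.takeWhile_map, hfun, htw, List.map_cons, hfa, hid, List.map_id]
      rw [List.map_cons] at hdrop htake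
      rw [pvSplitOne_span]
      rcases hd : t.dropWhile (fun x => !pvSep x) with _ | ⟨b, r⟩
      · simp only [List.map_cons]
        rw [hdrop, hd]
        simp only [List.map_nil, htake, List.filter_cons, List.isEmpty_cons,
          Bool.not_false, if_true, List.filter_nil]
        conv_rhs => rw [pvFields]
        simp [hs', hd, pvFields]
      · have hsb : pvSep b = true := by
          have := List.head?_dropWhile_not (fun x => !pvSep x) t
          rw [hd] at this
          simpa using this
        have hr : r.length < (a :: t).length := by
          have h3 : (b :: r).length ≤ t.length := by
            rw [← hd]; exact List.length_dropWhile_le _ _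
          simp only [List.length_cons] at h3 ⊢
          omega
        simp only [hdrop, hd, List.map_cons, htake, List.filter_cons, List.isEmpty_cons,
          Bool.not_false, if_true]
        rw [filter_splitOne r]
        conv_rhs => rw [pvFields]
        simp only [hs', Bool.false_eq_true, if_false, hd]
        conv_rhs => rw [pvFields]
        simp [hsb]
termination_by l => l.length
decreasing_by
  · simp
  · simpa using hr

theorem fields_dropSep (l : List Char) :
    pvFields (l.dropWhile pvSep) = pvFields l := by
  induction l with
  | nil => simp
  | cons a t ih =>
    by_cases hs : pvSep a = true
    · simp only [List.dropWhile_cons, hs, if_true]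
      rw [ih]
      conv_rhs => rw [pvFields]
      simp [hs]
    · have hs' : pvSep a = false := by simpa using hs
      simp [hs']

theorem token_fields (l : List Char) :
    pvFields l = if (pvToken l).1.isEmpty then [] else (pvToken l).1 :: pvFields (pvToken l).2 := by
  rcases hr : l.dropWhile pvSep with _ | ⟨a, t⟩
  · have h0 : pvFields l = [] := by
      rw [← fields_dropSep l, hr]
      simp [pvFields]
    simp [pvToken, hr, h0]
  · have hsa : pvSep a = false := by
      have := List.head?_dropWhile_not pvSep l
      rw [hr] at this
      simpa using this
    have h1 : (pvToken l).1 = a :: t.takeWhile (fun c => !pvSep c) := by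
      simp [pvToken, hr, hsa]
    have h2 : (pvToken l).2 = t.dropWhile (fun c => !pvSep c) := by
      simp [pvToken, hr, hsa]
    rw [h1, h2]
    simp only [List.isEmpty_cons, Bool.false_eq_true, if_false]
    rw [← fields_dropSep l, hr]
    conv_lhs => rw [pvFields]
    simp [hsa]

theorem A_as_fields (p : String) (hg : is_unc_path_py p = true) :
    network_path_parts_py p =
      (if (pvFields p.toList).length < 2 then none
       else some (String.ofList ((pvFields p.toList).getD 0 []),
                  String.ofList ((pvFields p.toList).getD 1 []))) := by
  have hchain : (PySem.Chars.splitOn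
        ((PySem.Chars.replace p.toList ['/'] ['\\']).dropWhile (· == '\\')) ['\\']).filter
        (fun q => !q.isEmpty) = pvFields p.toList := by
    rw [replace_eq]
    have hfun : ((fun y : Char => y == '\\') ∘ pvRep) = pvSep := funext pvRep_beq
    have hdm : (List.map pvRep p.toList).dropWhile (· == '\\')
        = List.map pvRep (p.toList.dropWhile pvSep) := by
      rw [List.dropWhile_map, hfun]
    rw [hdm, splitOn_eq, filter_splitOne, fields_dropSep]
  simp only [network_path_parts_py, hg, Bool.true_eq_false, if_false, hchain]

theorem B_as_fields (l : List Char) :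
    (if (pvToken l).1.isEmpty || (pvToken (pvToken l).2).1.isEmpty then none
     else some (String.ofList (pvToken l).1, String.ofList (pvToken (pvToken l).2).1)) =
      (if (pvFields l).length < 2 then none
       else some (String.ofList ((pvFields l).getD 0 []),
                  String.ofList ((pvFields l).getD 1 []))) := by
  by_cases h1 : (pvToken l).1.isEmpty
  · rw [token_fields l]
    simp [h1]
  · by_cases h2 : (pvToken (pvToken l).2).1.isEmpty
    · rw [token_fields l, token_fields (pvToken l).2]
      simp [h1, h2]
    · rw [token_fields l, token_fields (pvToken l).2]
      simp [h1, h2]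

-- ===== VERDICT (by name: the statement is the Claim_ definition above) =====
theorem network_path_parts_py_spec : Claim_equal_network_path_parts_py := by
  intro p _
  show network_path_parts_py p = network_path_parts_py_alt p
  unfold network_path_parts_py_alt
  rcases hl : p.toList with _ | ⟨a, rest⟩
  · have hunc : is_unc_path_py p = false := by
      unfold is_unc_path_py
      split
      · rfl
      · simp [hl, PySem.Chars.startswith, List.isPrefixOf]
    simp [network_path_parts_py, hunc]
  · rcases rest with _ | ⟨b, rest2⟩
    · have hunc : is_unc_path_py p = false := by
        unfold is_unc_path_py
        split
        · rfl
        · have e1 : ("\\\\" : String).toList = ['\\', '\\'] := rfl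
          have e2 : ("//" : String).toList = ['/', '/'] := rfl
          simp [hl, e1, e2, PySem.Chars.startswith, List.isPrefixOf]
      simp [network_path_parts_py, hunc]
    · have hne : p ≠ "" := by
        intro h
        rw [h] at hl
        simp at hl
      have hunc : is_unc_path_py p = ((a == '\\' && b == '\\') || (a == '/' && b == '/')) := by
        unfold is_unc_path_py
        rw [if_neg hne]
        have e1 : ("\\\\" : String).toList = ['\\', '\\'] := rfl
        have e2 : ("//" : String).toList = ['/', '/'] := rfl
        simp [hl, e1, e2, PySem.Chars.startswith, List.isPrefixOf, BEq.comm]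
      by_cases hg : ((a == '\\' && b == '\\') || (a == '/' && b == '/')) = true
      · rw [hg] at hunc
        rw [A_as_fields p hunc, hl]
        simp only [hg, if_true]
        exact (B_as_fields (a :: b :: rest2)).symm
      · have hgf : ((a == '\\' && b == '\\') || (a == '/' && b == '/')) = false := by
          simpa using hg
        rw [hgf] at hunc
        simp [network_path_parts_py, hunc, hgf]
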